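-- pv_equiv track=rewrite | github.com/nikfuzz/DataStructures_Algorithms | searching/Smallest_Good_Base.py | check
-- ===== SOURCE A (Python) =====
-- def check(n,i):
--
--     l = 2
--     r = n-1
--
--     while(l<=r):
--         m = (l+r)//2
--
--         sum = 0
--         temp = 1
--         for j in range(i):
--             sum += temp
--             temp *= m
--
--         if sum == n:
--             return m
--         elif sum > n:
--             r = m-1
--         else:
--             l = m+1
--
--     return -1
-- ===== SOURCE B (Python) =====
-- def check(n, i):
--     # A base m in [2, n-1] with 1 + m + ... + m**(i-1) == n, else -1.
--     if n < 3 or i < 2: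
--         return -1
--     if i == 2:
--         return n - 1
--     e = i - 1
--     if n.bit_length() <= e:      # then 2**e > n: no base >= 2 can fit
--         return -1
--     lo, hi = 2, n                # binary search the integer (i-1)-th root of n
--     while lo < hi:
--         mid = (lo + hi + 1) // 2
--         if mid ** e <= n:
--             lo = mid
--         else:
--             hi = mid - 1
--     m = lo
--     return m if (m ** i - 1) // (m - 1) == n else -1
-- ===== Notes on version B (the rewrite author's own statement) =====
-- stated objective: faster
-- what changed: Instead of binary-searching the base and summing i terms at each probe, B computes the integer (i-1)-th root of n by a binary search using fast exponentiation and verifies the single candidate with the closed-form geometric sum (m**i - 1)//(m - 1).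
import Mathlib
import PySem

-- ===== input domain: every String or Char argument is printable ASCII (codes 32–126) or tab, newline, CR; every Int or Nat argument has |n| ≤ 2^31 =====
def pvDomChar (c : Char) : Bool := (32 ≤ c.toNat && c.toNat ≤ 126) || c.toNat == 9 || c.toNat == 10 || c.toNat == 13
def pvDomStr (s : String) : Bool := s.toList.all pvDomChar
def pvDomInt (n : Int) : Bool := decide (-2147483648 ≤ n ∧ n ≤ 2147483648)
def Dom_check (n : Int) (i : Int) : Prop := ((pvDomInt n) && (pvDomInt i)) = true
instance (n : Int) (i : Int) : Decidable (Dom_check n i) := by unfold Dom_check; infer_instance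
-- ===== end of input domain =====

-- B replaces A's binary search over the base (each probe summing i terms) by computing the
-- integer (i-1)-th root of n with fast exponentiation and verifying the single candidate
-- against the closed-form geometric sum (m**i - 1)//(m - 1); objective: faster.

-- ===== PORT A =====
-- sum = 0; temp = 1; for j in range(i): sum += temp; temp *= m   (returns sum)
def checkSum (m : Int) (i : Int) : Int :=
  ((PySem.List.pyRange 0 i 1).foldl (fun (st : Int × Int) _ => (st.1 + st.2, st.2 * m)) (0, 1)).1

-- while l <= r: m = (l+r)//2; … return m / shrink to (l, m-1) or (m+1, r);  else -1
def checkLoop (n : Int) (i : Int) (l : Int) (r : Int) : Int :=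
  if h : l ≤ r then
    if checkSum (PySem.Int.floordiv (l + r) 2) i = n then PySem.Int.floordiv (l + r) 2
    else if checkSum (PySem.Int.floordiv (l + r) 2) i > n then
      checkLoop n i l (PySem.Int.floordiv (l + r) 2 - 1)
    else
      checkLoop n i (PySem.Int.floordiv (l + r) 2 + 1) r
  else -1
termination_by (r - l + 1).toNat
decreasing_by
  · have := PySem.Int.floordiv_two_mid_bounds h
    omega
  · have := PySem.Int.floordiv_two_mid_bounds h
    omega

def check (n : Int) (i : Int) : Int := checkLoop n i 2 (n - 1)

-- ===== PORT B =====
-- while lo < hi: mid = (lo+hi+1)//2; if mid**e <= n: lo = mid else hi = mid-1   (returns lo)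
-- (mid ** e is ported as mid ^ e.toNat — exact here since B only calls this with e ≥ 2)
def rootLoop (n : Int) (e : Int) (lo : Int) (hi : Int) : Int :=
  if h : lo < hi then
    if PySem.Int.floordiv (lo + hi + 1) 2 ^ e.toNat ≤ n then
      rootLoop n e (PySem.Int.floordiv (lo + hi + 1) 2) hi
    else
      rootLoop n e lo (PySem.Int.floordiv (lo + hi + 1) 2 - 1)
  else lo
termination_by (hi - lo).toNat
decreasing_by
  · rw [PySem.Int.floordiv_eq_ediv_of_pos (by omega : (0:Int) < 2)]
    omega
  · rw [PySem.Int.floordiv_eq_ediv_of_pos (by omega : (0:Int) < 2)]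
    omega

-- n.bit_length() <= e is ported via PySem.Int.bitLength (exact); m ** i as m ^ i.toNat (i ≥ 3 here)
def check_alt (n : Int) (i : Int) : Int :=
  if n < 3 ∨ i < 2 then -1
  else if i = 2 then n - 1
  else if (PySem.Int.bitLength n : Int) ≤ i - 1 then -1
  else if PySem.Int.floordiv (rootLoop n (i - 1) 2 n ^ i.toNat - 1) (rootLoop n (i - 1) 2 n - 1) = n then
    rootLoop n (i - 1) 2 n
  else -1

-- ===== PRECONDITION & SPEC =====
def Spec_check (n : Int) (i : Int) (out : Int) : Prop := out = check_alt n i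
instance (n : Int) (i : Int) (out : Int) : Decidable (Spec_check n i out) := by unfold Spec_check; infer_instance

-- ===== CLAIM (what is proved, stated in full; the proofs are below) =====
def Claim_equal_check : Prop := ∀ (n : Int) (i : Int), Dom_check n i → Spec_check n i (check n i)

-- ===== LEMMAS AND PROOFS =====

-- the geometric sum 1 + m + … + m^(k-1): the value A's inner loop accumulates
def G (m : Int) (k : Nat) : Int := ∑ j ∈ Finset.range k, m ^ j

lemma foldAux (m : Int) : ∀ (L : List Int) (s t : Int),
    (L.foldl (fun (st : Int × Int) _ => (st.1 + st.2, st.2 * m)) (s, t)) =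
      (s + t * G m L.length, t * m ^ L.length) := by
  intro L
  induction L with
  | nil => intro s t; simp [G]
  | cons x L ih =>
      intro s t
      simp only [List.foldl_cons, ih, List.length_cons, Prod.mk.injEq]
      refine ⟨?_, by ring⟩
      simp only [G]; rw [geom_sum_succ]; ring

lemma checkSum_eq (m i : Int) : checkSum m i = G m i.toNat := by
  unfold checkSum
  rw [foldAux]
  simp [PySem.List.length_pyRange_one]

lemma G_mono {a b : Int} {k : Nat} (ha : 2 ≤ a) (hab : a < b) (hk : 2 ≤ k) : G a k < G b k := by
  unfold G
  apply Finset.sum_lt_sum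
  · intro j _; exact pow_le_pow_left₀ (by omega) (le_of_lt hab) j
  · exact ⟨1, Finset.mem_range.2 (by omega), by simpa using hab⟩

lemma G_fdiv (m : Int) (k : Nat) (hm : 2 ≤ m) :
    PySem.Int.floordiv (m ^ k - 1) (m - 1) = G m k := by
  have h : m ^ k - 1 = G m k * (m - 1) := by rw [← geom_sum_mul]; rfl
  rw [h, PySem.Int.floordiv_eq_ediv_of_pos (by omega), Int.mul_ediv_cancel _ (by omega)]

lemma G_lower (m : Int) (E : Nat) (hm : 1 ≤ m) (hE : 1 ≤ E) : m ^ E + 1 ≤ G m (E + 1) := by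
  rw [G, geom_sum_succ']
  have h1 : (1:Int) ≤ ∑ j ∈ Finset.range E, m ^ j := by
    calc (1:Int) = ∑ j ∈ Finset.range 1, m ^ j := by simp
    _ ≤ ∑ j ∈ Finset.range E, m ^ j :=
        Finset.sum_le_sum_of_subset_of_nonneg (Finset.range_subset_range.mpr hE)
          (fun j _ _ => pow_nonneg (by omega) j)
  omega

lemma G_upper_le (m : Int) (d : Nat) (hm : 0 ≤ m) : G m (d + 1) ≤ (m + 1) ^ d := by
  induction d with
  | zero => simp [G]
  | succ d ih =>
      rw [G, geom_sum_succ, ← G]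
      have h1 : (1:Int) ≤ (m + 1) ^ d := one_le_pow₀ (by omega)
      calc m * G m (d + 1) + 1 ≤ m * (m + 1) ^ d + 1 := by nlinarith
        _ ≤ (m + 1) ^ (d + 1) := by rw [pow_succ]; nlinarith

lemma G_upper (m : Int) (d : Nat) (hm : 1 ≤ m) (hd : 2 ≤ d) : G m (d + 1) < (m + 1) ^ d := by
  obtain ⟨d', rfl⟩ : ∃ d', d = d' + 1 := ⟨d - 1, by omega⟩
  rw [G, geom_sum_succ, ← G]
  have h1 : (2:Int) ≤ (m + 1) ^ d' := by
    have := one_lt_pow₀ (a := m + 1) (by omega) (n := d') (by omega)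
    omega
  have h2 := G_upper_le m d' (by omega)
  have h3 : (0:Int) < G m (d' + 1) := by
    have := G_lower m d' hm (by omega)
    have := pow_nonneg (a := m) (by omega) d'
    omega
  calc m * G m (d' + 1) + 1 ≤ m * (m + 1) ^ d' + 1 := by nlinarith
    _ < (m + 1) ^ (d' + 1) := by rw [pow_succ]; nlinarith

lemma bitLength_le_iff (n : Int) (e : Int) (hn : 0 < n) (he : 0 < e) :
    ((PySem.Int.bitLength n : Int) ≤ e ↔ n < 2 ^ e.toNat) := by
  have hlt := PySem.Int.lt_two_pow_bitLength n
  have hge := PySem.Int.two_pow_bitLength_le n (by omega)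
  have hn' : ((n.natAbs : Int)) = n := Int.natAbs_of_nonneg (by omega)
  have hlt' : n < (2:Int) ^ PySem.Int.bitLength n := by
    calc n = (n.natAbs : Int) := hn'.symm
    _ < ((2 ^ PySem.Int.bitLength n : Nat) : Int) := by exact_mod_cast hlt
    _ = (2:Int) ^ PySem.Int.bitLength n := by push_cast; ring
  have hge' : (2:Int) ^ (PySem.Int.bitLength n - 1) ≤ n := by
    calc (2:Int) ^ (PySem.Int.bitLength n - 1) = ((2 ^ (PySem.Int.bitLength n - 1) : Nat) : Int) := by push_cast; ring
    _ ≤ (n.natAbs : Int) := by exact_mod_cast hge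
    _ = n := hn'
  constructor
  · intro h
    have : (2:Int) ^ PySem.Int.bitLength n ≤ 2 ^ e.toNat :=
      pow_le_pow_right₀ (by omega) (by omega)
    omega
  · intro h
    by_contra hc
    have : (2:Int) ^ e.toNat ≤ 2 ^ (PySem.Int.bitLength n - 1) :=
      pow_le_pow_right₀ (by omega) (by omega)
    omega

lemma root_unique {n : Int} {E : Nat} {a b : Int} (ha0 : 0 ≤ a) (hb0 : 0 ≤ b)
    (ha : a ^ E ≤ n) (ha' : n < (a + 1) ^ E) (hb : b ^ E ≤ n) (hb' : n < (b + 1) ^ E) : a = b := by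
  rcases lt_trichotomy a b with h | h | h
  · exfalso
    have : (a + 1) ^ E ≤ b ^ E := pow_le_pow_left₀ (by omega) (by omega) E
    omega
  · exact h
  · exfalso
    have : (b + 1) ^ E ≤ a ^ E := pow_le_pow_left₀ (by omega) (by omega) E
    omega

lemma rootLoop_spec (n e : Int) : ∀ (k : Nat) (lo hi : Int), (hi - lo).toNat = k → 1 ≤ lo → lo ≤ hi →
    lo ^ e.toNat ≤ n → n < (hi + 1) ^ e.toNat →
    lo ≤ rootLoop n e lo hi ∧ rootLoop n e lo hi ≤ hi ∧
      rootLoop n e lo hi ^ e.toNat ≤ n ∧ n < (rootLoop n e lo hi + 1) ^ e.toNat := by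
  intro k
  induction k using Nat.strong_induction_on with
  | _ k ih =>
    intro lo hi hk h1 h2 h3 h4
    rw [rootLoop]
    by_cases hlh : lo < hi
    · have hmid : lo + 1 ≤ PySem.Int.floordiv (lo + hi + 1) 2 ∧
          PySem.Int.floordiv (lo + hi + 1) 2 ≤ hi := by
        rw [PySem.Int.floordiv_eq_ediv_of_pos (by omega : (0:Int) < 2)]
        omega
      simp only [dif_pos hlh]
      by_cases hp : PySem.Int.floordiv (lo + hi + 1) 2 ^ e.toNat ≤ n
      · simp only [if_pos hp]
        have h := ih (hi - PySem.Int.floordiv (lo + hi + 1) 2).toNat (by omega)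
          (PySem.Int.floordiv (lo + hi + 1) 2) hi rfl (by omega) (by omega) hp h4
        exact ⟨by omega, h.2.1, h.2.2⟩
      · simp only [if_neg hp]
        have h := ih (PySem.Int.floordiv (lo + hi + 1) 2 - 1 - lo).toNat (by omega)
          lo (PySem.Int.floordiv (lo + hi + 1) 2 - 1) rfl h1 (by omega) h3
          (by have : PySem.Int.floordiv (lo + hi + 1) 2 - 1 + 1 = PySem.Int.floordiv (lo + hi + 1) 2 := by ring
              rw [this]; omega)
        exact ⟨h.1, by omega, h.2.2⟩
    · simp only [dif_neg hlh]
      have heq : lo = hi := by omega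
      subst heq
      exact ⟨le_refl _, le_refl _, h3, h4⟩

lemma checkLoop_none (n i : Int) : ∀ (k : Nat) (l r : Int), (r - l + 1).toNat = k →
    (∀ m : Int, l ≤ m → m ≤ r → checkSum m i ≠ n) → checkLoop n i l r = -1 := by
  intro k
  induction k using Nat.strong_induction_on with
  | _ k ih =>
    intro l r hk h
    rw [checkLoop]
    by_cases hlr : l ≤ r
    · have hmid := PySem.Int.floordiv_two_mid_bounds hlr
      simp only [dif_pos hlr]
      rw [if_neg (h _ hmid.1 hmid.2)]
      by_cases hgt : checkSum (PySem.Int.floordiv (l + r) 2) i > n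
      · rw [if_pos hgt]
        exact ih _ (by omega) l (PySem.Int.floordiv (l + r) 2 - 1) rfl
          (fun m hm hm' => h m hm (by omega))
      · rw [if_neg hgt]
        exact ih _ (by omega) (PySem.Int.floordiv (l + r) 2 + 1) r rfl
          (fun m hm hm' => h m (by omega) hm')
    · simp only [dif_neg hlr]

lemma checkLoop_found (n i : Int) (hi2 : 2 ≤ i) : ∀ (k : Nat) (l r ms : Int), (r - l + 1).toNat = k →
    2 ≤ l → l ≤ ms → ms ≤ r → checkSum ms i = n → checkLoop n i l r = ms := by
  intro k
  induction k using Nat.strong_induction_on with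
  | _ k ih =>
    intro l r ms hk hl h1 h2 hs
    have hlr : l ≤ r := le_trans h1 h2
    have hmid := PySem.Int.floordiv_two_mid_bounds hlr
    have hknat : 2 ≤ i.toNat := by omega
    rw [checkLoop]
    simp only [dif_pos hlr]
    rw [checkSum_eq] at hs ⊢
    by_cases heq : G (PySem.Int.floordiv (l + r) 2) i.toNat = n
    · rw [if_pos heq]
      rcases lt_trichotomy (PySem.Int.floordiv (l + r) 2) ms with hc | hc | hc
      · exfalso
        have := G_mono (a := PySem.Int.floordiv (l + r) 2) (by omega) hc hknat
        omega
      · exact hc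
      · exfalso
        have := G_mono (a := ms) (by omega) hc hknat
        omega
    · rw [if_neg heq]
      by_cases hgt : G (PySem.Int.floordiv (l + r) 2) i.toNat > n
      · rw [if_pos hgt]
        have hms : ms < PySem.Int.floordiv (l + r) 2 := by
          by_contra hc
          rcases eq_or_lt_of_le (not_lt.mp hc) with hc' | hc'
          · exact heq (hc' ▸ hs)
          · have := G_mono (a := PySem.Int.floordiv (l + r) 2) (by omega) hc' hknat
            omega
        have := ih _ (by omega) l (PySem.Int.floordiv (l + r) 2 - 1) ms rfl hl h1 (by omega)
          (by rw [checkSum_eq]; exact hs)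
        omega
      · rw [if_neg hgt]
        have hms : PySem.Int.floordiv (l + r) 2 < ms := by
          by_contra hc
          rcases eq_or_lt_of_le (not_lt.mp hc) with hc' | hc'
          · exact heq (hc' ▸ hs)
          · have := G_mono (a := ms) (by omega) hc' hknat
            omega
        have := ih _ (by omega) (PySem.Int.floordiv (l + r) 2 + 1) r ms rfl (by omega) (by omega) h2
          (by rw [checkSum_eq]; exact hs)
        omega

theorem main_eq (n i : Int) : check n i = check_alt n i := by
  unfold check check_alt
  by_cases hn : n < 3
  · rw [checkLoop]
    simp only [dif_neg (by omega : ¬ (2:Int) ≤ n - 1)]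
    rw [if_pos (Or.inl hn)]
  · push Not at hn
    by_cases hi : i < 2
    · rw [if_pos (Or.inr hi)]
      apply checkLoop_none n i _ 2 (n-1) rfl
      intro m hm hm'
      rw [checkSum_eq]
      have hto : i.toNat = 0 ∨ i.toNat = 1 := by omega
      rcases hto with h | h <;> rw [h] <;> simp [G] <;> omega
    · push Not at hi
      rw [if_neg (by omega : ¬ (n < 3 ∨ i < 2))]
      by_cases hi2 : i = 2
      · subst hi2
        rw [if_pos rfl]
        apply checkLoop_found n 2 (by omega) _ 2 (n-1) (n-1) rfl (by omega) (by omega) (le_refl _)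
        rw [checkSum_eq]
        show G (n-1) 2 = n
        simp [G, Finset.sum_range_succ]
      · rw [if_neg hi2]
        have hi3 : 3 ≤ i := by omega
        have hE2 : 2 ≤ (i - 1).toNat := by omega
        have hkE : i.toNat = (i - 1).toNat + 1 := by omega
        by_cases hex : ∃ m' : Int, 2 ≤ m' ∧ G m' i.toNat = n
        · obtain ⟨m', hm'2, hm'G⟩ := hex
          have hlow : m' ^ (i - 1).toNat + 1 ≤ n := by
            rw [← hm'G, hkE]
            exact G_lower m' _ (by omega) (by omega)
          have hupp : n < (m' + 1) ^ (i - 1).toNat := by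
            rw [← hm'G, hkE]
            exact G_upper m' _ (by omega) hE2
          have h2E : (2:Int) ^ (i - 1).toNat ≤ m' ^ (i - 1).toNat :=
            pow_le_pow_left₀ (by omega) hm'2 _
          have hm'sq : m' * m' ≤ m' ^ (i - 1).toNat := by
            calc m' * m' = m' ^ 2 := by ring
            _ ≤ m' ^ (i - 1).toNat := pow_le_pow_right₀ (by omega) hE2
          have hnm' : m' + 2 ≤ n := by nlinarith
          rw [checkLoop_found n i (by omega) _ 2 (n-1) m' rfl (by omega) hm'2 (by omega)
            (by rw [checkSum_eq]; exact hm'G)]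
          rw [if_neg (by rw [bitLength_le_iff n (i-1) (by omega) (by omega)]; omega)]
          have hroot := rootLoop_spec n (i - 1) (n - 2).toNat 2 n (by omega) (by omega) (by omega)
            (by calc (2:Int) ^ (i-1).toNat ≤ m' ^ (i-1).toNat := h2E
                _ ≤ n := by omega)
            (by have h1 : n < n + 1 := by omega
                have h2 : (n+1:Int) ≤ (n+1) ^ (i-1).toNat :=
                  le_self_pow₀ (by omega) (by omega)
                omega)
          have hr : rootLoop n (i - 1) 2 n = m' :=
            root_unique (by omega) (by omega) hroot.2.2.1 hroot.2.2.2 (by omega) hupp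
          rw [hr, G_fdiv m' i.toNat hm'2, if_pos hm'G]
        · push Not at hex
          rw [checkLoop_none n i _ 2 (n-1) rfl
            (fun m hm hm' => by rw [checkSum_eq]; exact hex m hm)]
          by_cases hg : (PySem.Int.bitLength n : Int) ≤ i - 1
          · rw [if_pos hg]
          · rw [if_neg hg]
            rw [bitLength_le_iff n (i-1) (by omega) (by omega)] at hg
            push Not at hg
            have hroot := rootLoop_spec n (i - 1) (n - 2).toNat 2 n (by omega) (by omega) (by omega)
              hg
              (by have h1 : n < n + 1 := by omega
                  have h2 : (n+1:Int) ≤ (n+1) ^ (i-1).toNat :=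
                    le_self_pow₀ (by omega) (by omega)
                  omega)
            rw [G_fdiv _ i.toNat (by omega), if_neg (hex _ (by omega))]

-- ===== VERDICT (by name: the statement is the Claim_ definition above) =====
theorem check_spec : Claim_equal_check := by
  intro n i _
  show check n i = check_alt n i
  exact main_eq n i
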